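-- pv_equiv track=rewrite | github.com/iPsychonaut/FASTB | bin/fastb.py | _apply_softmask_runs
-- ===== SOURCE A (Python) =====
-- from typing import List, Tuple, Optional
--
-- def _apply_softmask_runs(seq: str, runs: List[Tuple[int, int]]) -> str:
--     """Lowercase seq positions per runs; returns new string."""
--     if not runs:
--         return seq
--     s = list(seq)
--     L = len(s)
--     for start, length in runs:
--         end = min(L, start + length)
--         for k in range(start, end):
--             s[k] = s[k].lower()
--     return "".join(s)
-- ===== SOURCE B (Python) =====
-- from typing import List, Tuple
--
-- def _apply_softmask_runs(seq: str, runs: List[Tuple[int, int]]) -> str: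
--     """Lowercase seq positions per runs; difference-array coverage then one pass."""
--     L = len(seq)
--     diff = [0] * (L + 1)
--     for start, length in runs:
--         lo = min(start, L)
--         hi = min(start + length, L)
--         if lo < hi:
--             diff[lo] += 1
--             diff[hi] -= 1
--     out = []
--     cov = 0
--     for i, ch in enumerate(seq):
--         cov += diff[i]
--         out.append(ch.lower() if cov > 0 else ch)
--     return "".join(out)
-- ===== Notes on version B (the rewrite author's own statement) =====
-- stated objective: alternative
-- what changed: Replaces per-run character-by-character lowering (touching every covered position once per run) with a difference-array coverage count built from the run endpoints, followed by a single prefix-sum pass over the sequence.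
-- outside the precondition, e.g. on _apply_softmask_runs('AB', [(-1, 1)]): A returns 'Ab', B returns 'AB'
import Mathlib
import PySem

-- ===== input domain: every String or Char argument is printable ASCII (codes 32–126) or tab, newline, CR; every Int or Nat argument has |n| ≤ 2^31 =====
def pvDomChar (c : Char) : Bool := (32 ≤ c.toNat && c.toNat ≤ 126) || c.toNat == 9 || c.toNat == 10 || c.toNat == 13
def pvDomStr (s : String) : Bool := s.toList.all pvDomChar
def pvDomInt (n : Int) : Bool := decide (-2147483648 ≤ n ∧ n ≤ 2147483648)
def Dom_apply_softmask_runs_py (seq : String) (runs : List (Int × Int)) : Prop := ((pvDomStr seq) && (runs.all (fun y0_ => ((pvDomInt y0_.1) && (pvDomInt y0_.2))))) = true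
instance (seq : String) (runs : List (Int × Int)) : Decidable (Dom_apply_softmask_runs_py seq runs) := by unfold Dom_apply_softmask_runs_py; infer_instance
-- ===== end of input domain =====

-- B replaces A's per-run character-by-character lowering with a difference-array coverage
-- count and a single pass over the sequence; same cost class on typical inputs.


-- ===== PORT A =====
-- s[k] = s[k].lower() with Python's index semantics (negative k counts from the end; an
-- out-of-range k raises IndexError in Python — such inputs lie outside Pre_, here modify is id)
def pvSetLowerA (s : List Char) (k : Int) : List Char :=
  let j : Int := if k < 0 then k + s.length else k
  s.modify j.toNat PySem.Chars.lowerChar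

def apply_softmask_runs_py (seq : String) (runs : List (Int × Int)) : String :=
  if runs = [] then seq
  else
    let s := seq.toList
    let L : Int := s.length
    let final := runs.foldl (fun s r =>
      let e := min L (r.1 + r.2)
      (PySem.List.pyRange r.1 e 1).foldl (fun s k => pvSetLowerA s k) s) s
    String.ofList final

-- ===== PORT B =====
-- diff[i] += v with Python's index semantics (inside Pre_ every index used is in range)
def pvBump (d : List Int) (i : Int) (v : Int) : List Int :=
  let j : Int := if i < 0 then i + d.length else i
  d.modify j.toNat (· + v)

def pvDiffArr (L : Int) (runs : List (Int × Int)) : List Int :=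
  runs.foldl (fun d r =>
    let lo := min r.1 L
    let hi := min (r.1 + r.2) L
    if lo < hi then pvBump (pvBump d lo 1) hi (-1) else d)
    (List.replicate (L.toNat + 1) 0)

def apply_softmask_runs_py_alt (seq : String) (runs : List (Int × Int)) : String :=
  let L : Int := seq.toList.length
  let diff := pvDiffArr L runs
  let fin := (PySem.List.enumerate seq.toList).foldl
    (fun (st : Int × List Char) p =>
      let cov := st.1 + PySem.List.pyGetD diff p.1 0
      (cov, st.2 ++ [if 0 < cov then PySem.Chars.lowerChar p.2 else p.2]))
    ((0 : Int), ([] : List Char))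
  String.ofList fin.2

-- ===== PRECONDITION & SPEC =====
-- Pre_ excludes runs with a negative start and positive length — outside the natural domain of
-- softmask runs: there A raises IndexError (start < -len(seq)) or lowercases tail positions
-- through Python's negative-index wraparound; runs with non-positive length are no-ops and stay inside.
def Pre_apply_softmask_runs_py (seq : String) (runs : List (Int × Int)) : Prop :=
  ∀ r ∈ runs, 0 ≤ r.1 ∨ r.2 ≤ 0
instance (seq : String) (runs : List (Int × Int)) : Decidable (Pre_apply_softmask_runs_py seq runs) := by unfold Pre_apply_softmask_runs_py; infer_instance

def pvWitness_apply_softmask_runs_py : String × (List (Int × Int)) := ("AbC xY", [(0, 2), (3, 9), (1, -4)])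

def Spec_apply_softmask_runs_py (seq : String) (runs : List (Int × Int)) (out : String) : Prop := out = apply_softmask_runs_py_alt seq runs
instance (seq : String) (runs : List (Int × Int)) (out : String) : Decidable (Spec_apply_softmask_runs_py seq runs out) := by unfold Spec_apply_softmask_runs_py; infer_instance

-- ===== CLAIM (what is proved, stated in full; the proofs are below) =====
def Claim_equal_apply_softmask_runs_py : Prop := ∀ (seq : String) (runs : List (Int × Int)), Dom_apply_softmask_runs_py seq runs → Pre_apply_softmask_runs_py seq runs → Spec_apply_softmask_runs_py seq runs (apply_softmask_runs_py seq runs)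

-- ===== LEMMAS AND PROOFS =====

lemma pvToNat_ofNat (n : Nat) (h : n < 55296) : (Char.ofNat n).toNat = n := by
  have hv : n.isValidChar := Or.inl h
  rw [Char.ofNat, dif_pos hv]
  simp only [Char.ofNatAux, Char.toNat]
  simp

lemma pvChar_le_iff (a b : Char) : a ≤ b ↔ a.toNat ≤ b.toNat := by
  rw [Char.le_def]
  exact Iff.symm UInt32.le_iff_toNat_le

-- ASCII lowercasing is idempotent
lemma pvLower_idem (c : Char) : PySem.Chars.lowerChar (PySem.Chars.lowerChar c) = PySem.Chars.lowerChar c := by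
  unfold PySem.Chars.lowerChar PySem.Chars.isupper
  by_cases h : ('A' ≤ c ∧ c ≤ 'Z')
  · obtain ⟨h1, h2⟩ := h
    have hZ : c.toNat ≤ 90 := by simpa using (pvChar_le_iff c 'Z').mp h2
    have hval : (Char.ofNat (c.toNat + 32)).toNat = c.toNat + 32 := pvToNat_ofNat _ (by omega)
    have hne : ¬ (Char.ofNat (c.toNat + 32) ≤ 'Z') := by
      rw [pvChar_le_iff, hval]
      have hA : 65 ≤ c.toNat := by simpa using (pvChar_le_iff 'A' c).mp h1
      simp; omega
    simp [h1, h2, hne]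
  · have hb : (decide ('A' ≤ c) && decide (c ≤ 'Z')) = false := by
      simpa [Bool.and_eq_true] using h
    simp [hb]

-- whether position i of the sequence is covered by run r
def pvCov (r : Int × Int) (i : Nat) : Bool :=
  decide (r.1 ≤ (i : Int)) && decide ((i : Int) < r.1 + r.2)

-- ----- A side: the nested loops lower position i iff some run covers it -----

lemma pvSetLowerA_length (s : List Char) (k : Int) : (pvSetLowerA s k).length = s.length := by
  simp [pvSetLowerA]

lemma pvInner_length (s : List Char) (l : List Int) :
    (l.foldl (fun s k => pvSetLowerA s k) s).length = s.length := by
  induction l generalizing s with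
  | nil => rfl
  | cons x xs ih => simp [List.foldl_cons, ih, pvSetLowerA_length]

lemma pvSetLowerA_get? (s : List Char) (a : Int) (ha : 0 ≤ a) (i : Nat) :
    (pvSetLowerA s a)[i]? = if (i : Int) = a then s[i]?.map PySem.Chars.lowerChar else s[i]? := by
  unfold pvSetLowerA
  rw [if_neg (by omega)]
  rw [List.getElem?_modify]
  by_cases hia : (i : Int) = a
  · rw [if_pos hia]
    have : a.toNat = i := by omega
    simp [this, Option.map]
  · rw [if_neg hia]
    have : ¬ (a.toNat = i) := by omega
    simp [this]

lemma pvInner_get? (s : List Char) (a b : Int) (ha : 0 ≤ a) (i : Nat) :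
    ((PySem.List.pyRange a b 1).foldl (fun s k => pvSetLowerA s k) s)[i]? =
      if a ≤ (i : Int) ∧ (i : Int) < b then s[i]?.map PySem.Chars.lowerChar else s[i]? := by
  have H : ∀ (n : Nat) (a : Int) (s : List Char), 0 ≤ a → (b - a).toNat = n →
      ((PySem.List.pyRange a b 1).foldl (fun s k => pvSetLowerA s k) s)[i]? =
      if a ≤ (i : Int) ∧ (i : Int) < b then s[i]?.map PySem.Chars.lowerChar else s[i]? := by
    intro n
    induction n with
    | zero =>
      intro a s ha h0
      rw [PySem.List.pyRange_one_eq_nil (by omega)]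
      rw [if_neg (by omega)]
      rfl
    | succ n ih =>
      intro a s ha h0
      have hab : a < b := by omega
      rw [PySem.List.pyRange_one_cons hab]
      simp only [List.foldl_cons]
      rw [ih (a + 1) _ (by omega) (by omega)]
      rw [pvSetLowerA_get? s a ha i]
      by_cases hia : (i : Int) = a
      · rw [if_pos hia, if_neg (by omega), if_pos (by omega)]
      · rw [if_neg hia]
        by_cases hc : a + 1 ≤ (i : Int) ∧ (i : Int) < b
        · rw [if_pos hc, if_pos (by omega)]
        · rw [if_neg hc, if_neg (by omega)]
  exact H (b - a).toNat a s ha rfl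

lemma pvOuter_length (runs : List (Int × Int)) (s : List Char) (L : Int) :
    (runs.foldl (fun s r =>
      (PySem.List.pyRange r.1 (min L (r.1 + r.2)) 1).foldl (fun s k => pvSetLowerA s k) s) s).length
      = s.length := by
  induction runs generalizing s with
  | nil => rfl
  | cons r rs ih =>
    simp only [List.foldl_cons]
    rw [ih, pvInner_length]

lemma pvOuter_get? (runs : List (Int × Int)) (s : List Char) (L : Int)
    (hL : L = (s.length : Int)) (hpre : ∀ r ∈ runs, 0 ≤ r.1 ∨ r.2 ≤ 0) (i : Nat) (hi : i < s.length) :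
    (runs.foldl (fun s r =>
      (PySem.List.pyRange r.1 (min L (r.1 + r.2)) 1).foldl (fun s k => pvSetLowerA s k) s) s)[i]? =
      if runs.any (fun r => pvCov r i) then s[i]?.map PySem.Chars.lowerChar else s[i]? := by
  induction runs generalizing s with
  | nil => simp
  | cons r rs ih =>
    simp only [List.foldl_cons]
    set s' := (PySem.List.pyRange r.1 (min L (r.1 + r.2)) 1).foldl (fun s k => pvSetLowerA s k) s with hs'
    have hlen : s'.length = s.length := pvInner_length s _
    rw [ih s' (by rw [hlen]; exact hL) (fun x hx => hpre x (List.mem_cons_of_mem r hx)) (by omega)]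
    have hget : s'[i]? = if pvCov r i then s[i]?.map PySem.Chars.lowerChar else s[i]? := by
      rcases hpre r (List.mem_cons_self) with hr1 | hr2
      · rw [hs', pvInner_get? s r.1 (min L (r.1 + r.2)) hr1 i]
        by_cases hc : pvCov r i = true
        · rw [if_pos hc, if_pos ?_]
          simp only [pvCov, Bool.and_eq_true, decide_eq_true_eq] at hc
          exact ⟨hc.1, by omega⟩
        · rw [if_neg hc, if_neg ?_]
          simp only [pvCov, Bool.and_eq_true, decide_eq_true_eq] at hc
          intro hcon
          exact hc ⟨hcon.1, by omega⟩
      · have hnil : PySem.List.pyRange r.1 (min L (r.1 + r.2)) 1 = [] :=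
          PySem.List.pyRange_one_eq_nil (by omega)
        have hcf : pvCov r i = false := by
          by_contra hcon
          rw [Bool.not_eq_false] at hcon
          simp only [pvCov, Bool.and_eq_true, decide_eq_true_eq] at hcon
          omega
        rw [hs', hnil, hcf]
        simp
    rw [hget]
    by_cases h1 : pvCov r i = true
    · by_cases h2 : rs.any (fun r => pvCov r i) = true
      · rw [if_pos h1, if_pos h2, if_pos (by simp [h1, h2])]
        cases s[i]? <;> simp [pvLower_idem]
      · rw [if_pos h1, if_neg h2, if_pos (by simp [h1])]
    · by_cases h2 : rs.any (fun r => pvCov r i) = true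
      · rw [if_neg h1, if_pos h2, if_pos (by simp [h2])]
      · rw [if_neg h1, if_neg h2, if_neg (by simp only [List.any_cons, Bool.or_eq_true]; tauto)]

-- ----- B side: prefix sums of the difference array count the covering runs -----

def pvPS (d : List Int) (k n : Nat) : Int := ∑ t ∈ Finset.range n, d.getD (k + t) 0

lemma pvBump_length (d : List Int) (i v : Int) : (pvBump d i v).length = d.length := by
  simp [pvBump]

lemma pvPS_succ (d : List Int) (k n : Nat) :
    pvPS d k (n + 1) = d.getD k 0 + pvPS d (k + 1) n := by
  unfold pvPS
  rw [Finset.sum_range_succ']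
  simp only [Nat.add_zero]
  rw [add_comm]
  congr 1
  apply Finset.sum_congr rfl
  intro t _
  congr 1
  omega

lemma pvGetD_modify (d : List Int) (k : Nat) (f : Int → Int) (j : Nat) (hk : k < d.length) :
    (d.modify k f).getD j 0 = if j = k then f (d.getD j 0) else d.getD j 0 := by
  simp only [List.getD_eq_getElem?_getD, List.getElem?_modify]
  by_cases h : j = k
  · subst h
    rw [if_pos rfl]
    rw [List.getElem?_eq_getElem hk]
    simp
  · rw [if_neg h]
    have : ¬ (k = j) := fun hh => h hh.symm
    simp [this]

lemma pvPS_bump (d : List Int) (j : Int) (v : Int) (hj : 0 ≤ j) (hjl : j < (d.length : Int)) (n : Nat) :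
    pvPS (pvBump d j v) 0 n = pvPS d 0 n + (if j < (n : Int) then v else 0) := by
  unfold pvBump
  rw [if_neg (by omega)]
  unfold pvPS
  have hsum : ∀ t ∈ Finset.range n, (d.modify j.toNat (· + v)).getD (0 + t) 0
      = d.getD (0 + t) 0 + (if t = j.toNat then v else 0) := by
    intro t _
    rw [pvGetD_modify d j.toNat _ (0 + t) (by omega)]
    by_cases h : 0 + t = j.toNat
    · simp [h]
      omega
    · rw [if_neg h, if_neg (by omega)]
      ring
  rw [Finset.sum_congr rfl hsum, Finset.sum_add_distrib]
  congr 1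
  rw [Finset.sum_ite_eq' (Finset.range n) j.toNat (fun _ => v)]
  by_cases h : j.toNat ∈ Finset.range n
  · rw [if_pos h, if_pos (by simp at h; omega)]
  · rw [if_neg h, if_neg (by simp at h; omega)]

lemma pvPS_zero_init (L n : Nat) : pvPS (List.replicate (L + 1) 0) 0 n = 0 := by
  unfold pvPS
  apply Finset.sum_eq_zero
  intro t _
  simp [List.getD_eq_getElem?_getD, List.getElem?_replicate]
  split <;> rfl

lemma pvPS_diffArr (runs : List (Int × Int)) (L : Nat) (hpre : ∀ r ∈ runs, 0 ≤ r.1 ∨ r.2 ≤ 0)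
    (i : Nat) (hi : i < L) :
    pvPS (pvDiffArr (L : Int) runs) 0 (i + 1) = ((runs.countP (fun r => pvCov r i)) : Int) := by
  unfold pvDiffArr
  have H : ∀ (rs : List (Int × Int)) (d : List Int), (∀ r ∈ rs, 0 ≤ r.1 ∨ r.2 ≤ 0) → d.length = L + 1 →
      pvPS (rs.foldl (fun d r =>
        if min r.1 (L : Int) < min (r.1 + r.2) (L : Int) then
          pvBump (pvBump d (min r.1 (L : Int)) 1) (min (r.1 + r.2) (L : Int)) (-1) else d) d) 0 (i + 1)
      = pvPS d 0 (i + 1) + ((rs.countP (fun r => pvCov r i)) : Int) := by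
    intro rs
    induction rs with
    | nil => intro d _ _; simp
    | cons r rs ih =>
      intro d hpre' hdl
      simp only [List.foldl_cons]
      by_cases hlo : min r.1 (L : Int) < min (r.1 + r.2) (L : Int)
      · rw [if_pos hlo]
        have hr1 : 0 ≤ r.1 := by
          rcases hpre' r (List.mem_cons_self) with h | h
          · exact h
          · exfalso; omega
        have hlen1 : (pvBump d (min r.1 (L : Int)) 1).length = L + 1 := by
          rw [pvBump_length]; exact hdl
        have hlen2 : (pvBump (pvBump d (min r.1 (L : Int)) 1) (min (r.1 + r.2) (L : Int)) (-1)).length = L + 1 := by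
          rw [pvBump_length]; exact hlen1
        rw [ih _ (fun x hx => hpre' x (List.mem_cons_of_mem r hx)) hlen2]
        have e1 : pvPS (pvBump (pvBump d (min r.1 (L : Int)) 1) (min (r.1 + r.2) (L : Int)) (-1)) 0 (i + 1)
            = pvPS (pvBump d (min r.1 (L : Int)) 1) 0 (i + 1)
              + (if min (r.1 + r.2) (L : Int) < ((i + 1 : Nat) : Int) then (-1) else 0) :=
          pvPS_bump _ _ _ (by omega) (by rw [hlen1]; push_cast; omega) (i + 1)
        have e2 : pvPS (pvBump d (min r.1 (L : Int)) 1) 0 (i + 1)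
            = pvPS d 0 (i + 1) + (if min r.1 (L : Int) < ((i + 1 : Nat) : Int) then (1 : Int) else 0) :=
          pvPS_bump _ _ _ (by omega) (by rw [hdl]; push_cast; omega) (i + 1)
        rw [e1, e2, List.countP_cons]
        by_cases hc : pvCov r i = true
        · have hck : r.1 ≤ (i : Int) ∧ (i : Int) < r.1 + r.2 := by
            simpa only [pvCov, Bool.and_eq_true, decide_eq_true_eq] using hc
          have hv1 : (if min r.1 (L : Int) < ((i + 1 : Nat) : Int) then (1 : Int) else 0) = 1 :=
            if_pos (by push_cast; omega)
          have hv2 : (if min (r.1 + r.2) (L : Int) < ((i + 1 : Nat) : Int) then (-1 : Int) else 0) = 0 :=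
            if_neg (by push_cast; omega)
          rw [hv1, hv2, hc]
          simp only [reduceIte]
          push_cast
          omega
        · have hck : ¬ (r.1 ≤ (i : Int) ∧ (i : Int) < r.1 + r.2) := by
            simpa only [pvCov, Bool.and_eq_true, decide_eq_true_eq] using hc
          rw [Bool.not_eq_true] at hc
          rw [hc]
          by_cases h1 : r.1 ≤ (i : Int)
          · have h2 : r.1 + r.2 ≤ (i : Int) := by omega
            have hv1 : (if min r.1 (L : Int) < ((i + 1 : Nat) : Int) then (1 : Int) else 0) = 1 :=
              if_pos (by push_cast; omega)
            have hv2 : (if min (r.1 + r.2) (L : Int) < ((i + 1 : Nat) : Int) then (-1 : Int) else 0) = -1 :=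
              if_pos (by push_cast; omega)
            rw [hv1, hv2]
            simp only [Bool.false_eq_true, reduceIte]
            push_cast
            omega
          · have hv1 : (if min r.1 (L : Int) < ((i + 1 : Nat) : Int) then (1 : Int) else 0) = 0 :=
              if_neg (by push_cast; omega)
            have hv2 : (if min (r.1 + r.2) (L : Int) < ((i + 1 : Nat) : Int) then (-1 : Int) else 0) = 0 :=
              if_neg (by push_cast; omega)
            rw [hv1, hv2]
            simp only [Bool.false_eq_true, reduceIte]
            push_cast
            omega
      · rw [if_neg hlo]
        rw [ih _ (fun x hx => hpre' x (List.mem_cons_of_mem r hx)) hdl]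
        rw [List.countP_cons]
        have hc : pvCov r i = false := by
          by_contra hcon
          rw [Bool.not_eq_false] at hcon
          simp only [pvCov, Bool.and_eq_true, decide_eq_true_eq] at hcon
          exact hlo (by omega)
        simp [hc]
  rw [H runs _ hpre (by simp)]
  rw [pvPS_zero_init]
  simp

-- the scan's output list does not depend on the accumulator already written
lemma pvScan_acc (d : List Int) (xs : List (Int × Char)) :
    ∀ (c0 : Int) (acc : List Char),
    (xs.foldl (fun (st : Int × List Char) p =>
        let cov := st.1 + PySem.List.pyGetD d p.1 0
        (cov, st.2 ++ [if 0 < cov then PySem.Chars.lowerChar p.2 else p.2]))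
      (c0, acc)).2
    = acc ++ (xs.foldl (fun (st : Int × List Char) p =>
        let cov := st.1 + PySem.List.pyGetD d p.1 0
        (cov, st.2 ++ [if 0 < cov then PySem.Chars.lowerChar p.2 else p.2]))
      (c0, [])).2 := by
  induction xs with
  | nil => intro c0 acc; simp
  | cons p ps ih =>
    intro c0 acc
    simp only [List.foldl_cons]
    rw [ih _ (acc ++ [_]), ih _ ([] ++ [_])]
    simp

lemma pvScan_nil_get? (d : List Int) (xs : List Char) :
    ∀ (k : Nat) (c0 : Int) (i : Nat),
    ((((PySem.List.enumerate xs (k : Int))).foldl (fun (st : Int × List Char) p =>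
        let cov := st.1 + PySem.List.pyGetD d p.1 0
        (cov, st.2 ++ [if 0 < cov then PySem.Chars.lowerChar p.2 else p.2]))
      (c0, [])).2)[i]?
    = xs[i]?.map (fun ch => if 0 < c0 + pvPS d k (i + 1) then PySem.Chars.lowerChar ch else ch) := by
  induction xs with
  | nil => intro k c0 i; simp [PySem.List.enumerate]
  | cons x xs ih =>
    intro k c0 i
    rw [PySem.List.enumerate_cons]
    simp only [List.foldl_cons]
    have hk1 : (k : Int) + 1 = ((k + 1 : Nat) : Int) := by push_cast; ring
    have hget : PySem.List.pyGetD d (k : Int) 0 = d.getD k 0 := by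
      simp [PySem.List.pyGetD_natCast]
    rw [hk1, hget]
    rw [pvScan_acc]
    cases i with
    | zero =>
      simp only
      have hps : pvPS d k 1 = d.getD k 0 := by
        unfold pvPS
        rw [Finset.sum_range_one]
        simp
      simp [hps]
    | succ i =>
      have hlen : [if 0 < c0 + d.getD k 0 then PySem.Chars.lowerChar x else x].length = 1 := by simp
      rw [List.getElem?_append_right (by simp)]
      have heq : i + 1 - ([] ++ [if 0 < c0 + d.getD k 0 then PySem.Chars.lowerChar x else x]).length = i := by
        simp
      rw [heq]
      rw [ih (k + 1) (c0 + d.getD k 0) i]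
      have hcond : c0 + pvPS d k (i + 1 + 1) = c0 + d.getD k 0 + pvPS d (k + 1) (i + 1) := by
        rw [pvPS_succ]; ring
      simp [hcond]

-- B's output, elementwise
lemma pvAlt_get? (seq : String) (runs : List (Int × Int)) (hpre : ∀ r ∈ runs, 0 ≤ r.1 ∨ r.2 ≤ 0) (i : Nat) :
    (apply_softmask_runs_py_alt seq runs).toList[i]? =
      if runs.any (fun r => pvCov r i) then seq.toList[i]?.map PySem.Chars.lowerChar
      else seq.toList[i]? := by
  unfold apply_softmask_runs_py_alt
  simp only [String.toList_ofList]
  have h0 : ((0 : Nat) : Int) = (0 : Int) := rfl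
  rw [show (PySem.List.enumerate seq.toList 0) = (PySem.List.enumerate seq.toList ((0 : Nat) : Int)) from by rw [h0]]
  rw [pvScan_nil_get?]
  by_cases hi : i < seq.toList.length
  · rw [zero_add, pvPS_diffArr runs seq.toList.length hpre i hi]
    by_cases hany : runs.any (fun r => pvCov r i) = true
    · rw [if_pos hany]
      have hpos : 0 < runs.countP (fun r => pvCov r i) := by
        rw [List.countP_pos_iff]
        simpa using hany
      have hpos' : (0 : Int) < ((runs.countP (fun r => pvCov r i) : Nat) : Int) := by exact_mod_cast hpos
      have hif : (fun ch => if (0 : Int) < ((runs.countP (fun r => pvCov r i) : Nat) : Int)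
          then PySem.Chars.lowerChar ch else ch) = PySem.Chars.lowerChar :=
        funext (fun ch => if_pos hpos')
      rw [hif]
    · rw [if_neg hany]
      have hzero : runs.countP (fun r => pvCov r i) = 0 := by
        rw [List.countP_eq_zero]
        intro a ha hcon
        exact hany (List.any_eq_true.mpr ⟨a, ha, hcon⟩)
      rw [hzero]
      cases seq.toList[i]? <;> simp
  · have hnone : seq.toList[i]? = none := List.getElem?_eq_none (by omega)
    rw [hnone]
    split <;> simp

-- ===== VERDICT (by name: the statement is the Claim_ definition above) =====
theorem apply_softmask_runs_py_spec : Claim_equal_apply_softmask_runs_py := by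
  intro seq runs hdom hpre
  unfold Spec_apply_softmask_runs_py
  have hB := pvAlt_get? seq runs hpre
  by_cases hr : runs = []
  · subst hr
    unfold apply_softmask_runs_py
    rw [if_pos rfl]
    have hlist : (apply_softmask_runs_py_alt seq []).toList = seq.toList :=
      List.ext_getElem? (fun i => by rw [hB i]; simp)
    have := congrArg String.ofList hlist
    simpa [String.ofList_toList] using this.symm
  · unfold apply_softmask_runs_py
    rw [if_neg hr]
    simp only []
    have hA : ∀ i : Nat,
        (runs.foldl (fun s r =>
          (PySem.List.pyRange r.1 (min ((seq.toList.length : Nat) : Int) (r.1 + r.2)) 1).foldl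
            (fun s k => pvSetLowerA s k) s) seq.toList)[i]?
        = (apply_softmask_runs_py_alt seq runs).toList[i]? := by
      intro i
      rw [hB i]
      by_cases hi : i < seq.toList.length
      · exact pvOuter_get? runs seq.toList _ rfl hpre i hi
      · have hlen := pvOuter_length runs seq.toList ((seq.toList.length : Nat) : Int)
        rw [List.getElem?_eq_none (by omega)]
        rw [List.getElem?_eq_none (show seq.toList.length ≤ i by omega)]
        split <;> simp
    rw [show apply_softmask_runs_py_alt seq runs
        = String.ofList (apply_softmask_runs_py_alt seq runs).toList from
        (@String.ofList_toList (apply_softmask_runs_py_alt seq runs)).symm]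
    congr 1
    exact List.ext_getElem? hA
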